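-- pv_equiv track=rewrite | github.com/pranaysuyash/kenya-shif | combined_analyzer.py | _extract_dialysis_sections
-- ===== SOURCE A (Python) =====
-- def _extract_dialysis_sections(pdf_text: str) -> str:
--     """Extract dialysis-related sections from PDF"""
--     lines = pdf_text.split('\n')
--     dialysis_sections = []
--
--     for i, line in enumerate(lines):
--         if any(keyword.lower() in line.lower() for keyword in
--                ['dialysis', 'hemodialysis', 'hemodiafiltration', 'peritoneal']):
--             # Get extended context
--             start = max(0, i - 5)
--             end = min(len(lines), i + 6)
--             section = '\n'.join(lines[start:end])
--             dialysis_sections.append(section)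
--
--     return '\n\n---\n\n'.join(dialysis_sections[:5])  # Limit to avoid token limits
-- ===== SOURCE B (Python) =====
-- def _extract_dialysis_sections(pdf_text: str) -> str:
--     """Extract dialysis-related sections from PDF (streaming scan: bounded
--     buffer of the previous 5 lines, 5-line lookahead, stops as soon as the
--     5-section cap is reached instead of collecting everything and slicing)."""
--     keywords = ('dialysis', 'hemodialysis', 'hemodiafiltration', 'peritoneal')
--     lines = pdf_text.split('\n')
--     sections = []
--     before = []            # sliding buffer: at most the 5 most recent lines
--     pos = 0
--     while pos < len(lines) and len(sections) < 5:
--         line = lines[pos]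
--         pos += 1
--         if any(k.lower() in line.lower() for k in keywords):
--             sections.append('\n'.join(before + [line] + lines[pos:pos + 5]))
--         before.append(line)
--         if len(before) > 5:
--             del before[0]
--     return '\n\n---\n\n'.join(sections)
-- ===== Notes on version B (the rewrite author's own statement) =====
-- stated objective: alternative
-- what changed: A scans all lines and builds each window by slicing the whole list with max/min-clamped bounds, then truncates the collected list to 5; B is a streaming scan that maintains a bounded deque of the 5 most recent lines as the left context, uses only a forward lookahead slice for the right context, and terminates the scan as soon as 5 sections exist, so no window arithmetic on the full list and no post-hoc truncation.
import Mathlib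
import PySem

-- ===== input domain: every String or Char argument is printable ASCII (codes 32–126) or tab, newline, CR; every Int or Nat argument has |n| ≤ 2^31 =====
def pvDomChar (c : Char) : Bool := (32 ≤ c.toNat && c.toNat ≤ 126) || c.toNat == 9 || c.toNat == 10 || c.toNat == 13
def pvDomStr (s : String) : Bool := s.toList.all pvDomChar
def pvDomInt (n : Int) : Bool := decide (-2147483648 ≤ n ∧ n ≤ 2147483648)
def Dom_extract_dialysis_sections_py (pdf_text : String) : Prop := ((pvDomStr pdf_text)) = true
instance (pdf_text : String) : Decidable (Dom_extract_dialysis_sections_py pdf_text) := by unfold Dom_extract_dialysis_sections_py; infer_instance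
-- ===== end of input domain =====

-- B replaces A's collect-then-truncate scan with a streaming scan (bounded buffer of the
-- previous 5 lines, forward lookahead, early stop at 5 sections); same value, no speed claim.

-- ===== PORT A =====
def extract_dialysis_sections_py (pdf_text : String) : String :=
  let lines := (PySem.Str.split? pdf_text "\n").getD []   -- sep is the literal "\n" ≠ "", so split? is always some
  let dialysis_sections := (PySem.List.enumerate lines 0).foldl
    (fun acc p =>
      if (["dialysis", "hemodialysis", "hemodiafiltration", "peritoneal"].any
            (fun keyword => PySem.Str.isIn (PySem.Str.lower keyword) (PySem.Str.lower p.2))) then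
        let start := max 0 (p.1 - 5)
        let stop := min ((lines.length : Int)) (p.1 + 6)
        acc ++ [PySem.Str.join "\n" (PySem.List.slice lines (some start) (some stop))]
      else acc) []
  PySem.Str.join "\n\n---\n\n" (PySem.List.slice dialysis_sections none (some 5))

-- ===== PORT B =====
-- B-side helper: does a line contain a dialysis keyword?
def pvHitB (line : String) : Bool :=
  ["dialysis", "hemodialysis", "hemodiafiltration", "peritoneal"].any
    (fun k => PySem.Str.isIn (PySem.Str.lower k) (PySem.Str.lower line))

-- Source B's while loop: `pos < len(lines)` is mirrored structurally by the untraversed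
-- suffix of `lines` (first argument of the match) being nonempty; `lines[pos]` is its
-- head; `del before[0]` is `drop 1`; `lines[pos:pos+5]` is the slice after `pos += 1`.
def pvLoopB (lines : List String) : List String → Int → List String → List String → List String
  | [], _, _, sections => sections
  | line :: rest, pos, before, sections =>
    if sections.length < 5 then
      let pos' := pos + 1
      let sections' :=
        if pvHitB line then
          sections ++ [PySem.Str.join "\n"
            (before ++ [line] ++ PySem.List.slice lines (some pos') (some (pos' + 5)))]
        else sections
      let b := before ++ [line]
      let before' := if b.length > 5 then b.drop 1 else b
      pvLoopB lines rest pos' before' sections'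
    else sections

def extract_dialysis_sections_py_alt (pdf_text : String) : String :=
  let lines := (PySem.Str.split? pdf_text "\n").getD []   -- sep is the literal "\n" ≠ "", so split? is always some
  PySem.Str.join "\n\n---\n\n" (pvLoopB lines lines 0 [] [])

-- ===== PRECONDITION & SPEC =====
def Spec_extract_dialysis_sections_py (pdf_text : String) (out : String) : Prop := out = extract_dialysis_sections_py_alt pdf_text
instance (pdf_text : String) (out : String) : Decidable (Spec_extract_dialysis_sections_py pdf_text out) := by unfold Spec_extract_dialysis_sections_py; infer_instance

-- ===== CLAIM (what is proved, stated in full; the proofs are below) =====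
def Claim_equal_extract_dialysis_sections_py : Prop := ∀ (pdf_text : String), Dom_extract_dialysis_sections_py pdf_text → Spec_extract_dialysis_sections_py pdf_text (extract_dialysis_sections_py pdf_text)

-- ===== LEMMAS AND PROOFS =====

-- A's explicit min(len, i+6) slice bound equals the clamped i+6 bound, for an in-range index.
theorem pv_slice_min_eq {α : Type} (xs : List α) (k : Nat) (hk : k < xs.length) :
    PySem.List.slice xs (some (max 0 ((k : Int) - 5))) (some (min ((xs.length : Int)) ((k : Int) + 6)))
      = PySem.List.slice xs (some (max 0 ((k : Int) - 5))) (some ((k : Int) + 6)) := by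
  have h0 : (0 : Int) ≤ max 0 ((k : Int) - 5) := le_max_left _ _
  rw [PySem.List.slice_toNat xs h0 (by omega), PySem.List.slice_toNat xs h0 (by omega)]
  rw [List.take_eq_take_iff]
  simp only [List.length_drop]
  omega

-- A's window around index k splits into left context, the line itself, and the 5-line lookahead.
theorem pv_window_split (lines : List String) (k : Nat) (hk : k < lines.length) :
    PySem.List.slice lines (some (max 0 ((k : Int) - 5))) (some ((k : Int) + 6))
      = (lines.take k).drop (k - 5) ++ lines[k] ::
          PySem.List.slice lines (some ((k : Int) + 1)) (some (((k : Int) + 1) + 5)) := by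
  have h0 : (0 : Int) ≤ max 0 ((k : Int) - 5) := le_max_left _ _
  rw [PySem.List.slice_toNat lines h0 (by omega),
      PySem.List.slice_toNat lines (by omega) (by omega)]
  have hs : (max 0 ((k : Int) - 5)).toNat = k - 5 := by omega
  have h1 : ((k : Int) + 1).toNat = k + 1 := by omega
  have h2 : ((k : Int) + 1 + 5).toNat = k + 6 := by omega
  rw [hs, h1, h2]
  have hsplit : lines.drop (k - 5) = (lines.take k).drop (k - 5) ++ lines.drop k := by
    conv_lhs => rw [← List.take_append_drop k lines]
    rw [List.drop_append_of_le_length (by simp; omega)]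
  rw [hsplit, List.take_append]
  have hlen : ((lines.take k).drop (k - 5)).length = k - (k - 5) := by simp; omega
  rw [hlen]
  have hcons : lines.drop k = lines[k] :: lines.drop (k + 1) := List.drop_eq_getElem_cons hk
  rw [hcons]
  have h3 : ((k : Int) + 6).toNat = k + 6 := by omega
  rw [h3]
  have h6 : k + 6 - (k - 5) - (k - (k - 5)) = 6 := by omega
  have h5 : k + 6 - (k + 1) = 5 := by omega
  rw [h6, h5, List.take_succ_cons]
  congr 1
  exact List.take_of_length_le (by rw [hlen]; omega)

-- The sliding buffer invariant: appending the current line and trimming to 5 advances it.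
theorem pv_before_step (lines : List String) (k : Nat) (hk : k < lines.length) :
    (if ((lines.take k).drop (k - 5) ++ [lines[k]]).length > 5
       then ((lines.take k).drop (k - 5) ++ [lines[k]]).drop 1
       else (lines.take k).drop (k - 5) ++ [lines[k]]) = (lines.take (k + 1)).drop (k + 1 - 5) := by
  have htk : lines.take (k + 1) = lines.take k ++ [lines[k]] := by
    rw [List.take_add_one, List.getElem?_eq_getElem hk]; rfl
  have hlen : ((lines.take k).drop (k - 5)).length = k - (k - 5) := by simp; omega
  simp only [htk]
  by_cases h5 : k < 5
  · have : ¬ ((lines.take k).drop (k - 5) ++ [lines[k]]).length > 5 := by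
      simp [hlen]; omega
    rw [if_neg this]
    have : k - 5 = 0 := by omega
    have h15 : k + 1 - 5 = 0 := by omega
    simp [this, h15]
  · have : ((lines.take k).drop (k - 5) ++ [lines[k]]).length > 5 := by
      simp [hlen]; omega
    rw [if_pos this]
    rw [List.drop_append_of_le_length (by simp; omega)]
    rw [List.drop_append_of_le_length (by simp; omega)]
    rw [List.drop_drop]
    congr 2
    omega

-- The B loop computes the capped remainder of A's filtered/mapped window list.
theorem pvLoopB_spec (lines : List String) (rest : List String) (i : Nat)
    (before acc : List String)
    (hr : rest = lines.drop i)
    (hb : before = (lines.take i).drop (i - 5))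
    (ha : acc.length ≤ 5) :
    pvLoopB lines rest (i : Int) before acc
      = acc ++ (((PySem.List.enumerate rest (i : Int)).filter (fun p => pvHitB p.2)).map
          (fun p => PySem.Str.join "\n"
            (PySem.List.slice lines (some (max 0 (p.1 - 5))) (some (p.1 + 6))))).take
          (5 - acc.length) := by
  induction rest generalizing i before acc with
  | nil => simp [pvLoopB, PySem.List.enumerate_nil]
  | cons line rest' ih =>
    have hi : i < lines.length := by
      by_contra h
      rw [List.drop_eq_nil_of_le (by omega)] at hr
      simp at hr
    have hline : line = lines[i] := by
      have := List.drop_eq_getElem_cons hi (l := lines)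
      rw [← hr] at this
      exact (List.cons.injEq ..).mp this |>.1
    have hrest' : rest' = lines.drop (i + 1) := by
      have := List.drop_eq_getElem_cons hi (l := lines)
      rw [← hr] at this
      exact (List.cons.injEq ..).mp this |>.2
    rw [PySem.List.enumerate_cons]
    by_cases hcap : acc.length < 5
    · rw [pvLoopB, if_pos (by simpa using hcap)]
      by_cases hhit : pvHitB line
      · simp only [hhit, reduceIte, List.filter_cons, List.map_cons]
        have hwin : PySem.Str.join "\n"
            (before ++ [line] ++ PySem.List.slice lines (some ((i : Int) + 1)) (some (((i : Int) + 1) + 5)))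
            = PySem.Str.join "\n"
                (PySem.List.slice lines (some (max 0 ((i : Int) - 5))) (some ((i : Int) + 6))) := by
          rw [pv_window_split lines i hi, hb, hline]
          simp
        have hrec := ih (i + 1)
          (if (before ++ [line]).length > 5 then (before ++ [line]).drop 1 else before ++ [line])
          (acc ++ [PySem.Str.join "\n"
            (before ++ [line] ++ PySem.List.slice lines (some ((i : Int) + 1)) (some (((i : Int) + 1) + 5)))])
          (by rw [hrest'])
          (by simp only [hb, hline]; exact pv_before_step lines i hi)
          (by simp; omega)
        push_cast at hrec
        rw [hrec, hwin]
        have hta : (acc ++ [PySem.Str.join "\n"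
            (PySem.List.slice lines (some (max 0 ((i : Int) - 5))) (some ((i : Int) + 6)))]).length
            = acc.length + 1 := by simp
        rw [hta]
        rw [List.append_assoc]
        congr 1
        rw [List.singleton_append, ← List.take_succ_cons]
        congr 1
        omega
      · simp only [hhit, List.filter_cons]
        have hrec := ih (i + 1)
          (if (before ++ [line]).length > 5 then (before ++ [line]).drop 1 else before ++ [line])
          acc
          (by rw [hrest'])
          (by simp only [hb, hline]; exact pv_before_step lines i hi)
          ha
        push_cast at hrec
        simpa using hrec
    · have h5 : acc.length = 5 := by omega
      rw [pvLoopB, if_neg (by simpa using hcap)]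
      simp [h5]

theorem extract_dialysis_sections_py_eq (pdf_text : String) :
    extract_dialysis_sections_py pdf_text = extract_dialysis_sections_py_alt pdf_text := by
  simp only [extract_dialysis_sections_py, extract_dialysis_sections_py_alt]
  rw [PySem.List.foldl_append_if
        (fun (p : Int × String) => (["dialysis", "hemodialysis", "hemodiafiltration", "peritoneal"].any
            (fun keyword => PySem.Str.isIn (PySem.Str.lower keyword) (PySem.Str.lower p.2))))
        (fun (p : Int × String) =>
          PySem.Str.join "\n" (PySem.List.slice ((PySem.Str.split? pdf_text "\n").getD [])
            (some (max 0 (p.1 - 5))) (some (min ((((PySem.Str.split? pdf_text "\n").getD []).length : Int)) (p.1 + 6)))))]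
  rw [PySem.List.slice_to _ (show (0:Int) ≤ 5 by omega)]
  have hB := pvLoopB_spec ((PySem.Str.split? pdf_text "\n").getD []) ((PySem.Str.split? pdf_text "\n").getD []) 0 [] []
        (by simp) (by simp) (by simp)
  push_cast at hB
  rw [hB]
  simp only [List.nil_append, List.length_nil, Nat.sub_zero]
  have h5 : Int.toNat 5 = 5 := rfl
  rw [h5]
  refine congrArg (PySem.Str.join "\n\n---\n\n") ?_
  rw [← List.map_take, ← List.map_take]
  simp only [pvHitB]
  apply List.map_congr_left
  intro p hp
  have hmem := List.mem_filter.mp (List.mem_of_mem_take hp)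
  obtain ⟨k, hk, hpk⟩ := (PySem.List.mem_enumerate_iff _ _ _).mp hmem.1
  simp only [hpk, zero_add]
  rw [pv_slice_min_eq _ k hk]

-- ===== VERDICT (by name: the statement is the Claim_ definition above) =====
theorem extract_dialysis_sections_py_spec : Claim_equal_extract_dialysis_sections_py := by
  intro pdf_text _
  unfold Spec_extract_dialysis_sections_py
  exact extract_dialysis_sections_py_eq pdf_text
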